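-- pv_equiv track=rewrite | github.com/spegeerino/projects | Project Euler/projeuler096.py | check_dupes
-- ===== SOURCE A (Python) =====
-- def check_dupes(nine_nums):
--     non_emptys = []
--     for num in nine_nums:
--         if num in non_emptys:
--             return True
--         if num != 0:
--             non_emptys.append(num)
--     return False
-- ===== SOURCE B (Python) =====
-- def check_dupes(nine_nums):
--     nonzeros = [n for n in nine_nums if n != 0]
--     return len(nonzeros) != len(set(nonzeros))
-- ===== Notes on version B (the rewrite author's own statement) =====
-- stated objective: simpler
-- what changed: Replaces the interleaved scan with early return and conditional append to a seen-list (quadratic membership tests) by two plain passes: filter out zeros, then compare the list's length with its distinct count.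
import Mathlib
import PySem

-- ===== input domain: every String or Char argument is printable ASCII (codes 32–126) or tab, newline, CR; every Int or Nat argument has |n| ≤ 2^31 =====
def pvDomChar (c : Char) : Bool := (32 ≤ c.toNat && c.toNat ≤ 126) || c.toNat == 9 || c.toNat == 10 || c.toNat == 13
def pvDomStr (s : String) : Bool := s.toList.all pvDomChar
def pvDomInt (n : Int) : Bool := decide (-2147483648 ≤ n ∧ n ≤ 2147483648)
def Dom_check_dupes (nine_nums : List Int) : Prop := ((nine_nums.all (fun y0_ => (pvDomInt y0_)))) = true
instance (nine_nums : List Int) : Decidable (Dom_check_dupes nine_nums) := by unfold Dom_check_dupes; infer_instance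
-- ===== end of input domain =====

-- B replaces A's interleaved seen-list scan (early return, conditional append) by two
-- plain passes: filter out zeros, then compare length with distinct count. Objective: simpler.

-- ===== PORT A =====
def checkDupesLoop : List Int → List Int → Bool
  | [], _ => false
  | num :: rest, non_emptys =>
    if non_emptys.contains num then true
    else if num != 0 then checkDupesLoop rest (non_emptys ++ [num])
    else checkDupesLoop rest non_emptys

def check_dupes (nine_nums : List Int) : Bool := checkDupesLoop nine_nums []

-- ===== PORT B =====
def check_dupes_alt (nine_nums : List Int) : Bool :=
  let nonzeros := nine_nums.filter (fun n => n != 0)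
  nonzeros.length != (PySem.Set.ofList nonzeros).length
-- ===== PRECONDITION & SPEC =====
def Spec_check_dupes (nine_nums : List Int) (out : Bool) : Prop := out = check_dupes_alt nine_nums
instance (nine_nums : List Int) (out : Bool) : Decidable (Spec_check_dupes nine_nums out) := by unfold Spec_check_dupes; infer_instance

-- ===== CLAIM (what is proved, stated in full; the proofs are below) =====
def Claim_equal_check_dupes : Prop := ∀ (nine_nums : List Int), Dom_check_dupes nine_nums → Spec_check_dupes nine_nums (check_dupes nine_nums)

-- ===== LEMMAS AND PROOFS =====

theorem length_discard_of_mem {x : Int} {s : List Int} (hn : s.Nodup) (hx : x ∈ s) :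
    (PySem.Set.discard s x).length + 1 = s.length := by
  have hd : PySem.Set.discard s x = s.filter (fun y => y != x) := by
    simp [PySem.Set.discard, bne]
  have hc : s.count x = 1 := List.count_eq_one_of_mem hn hx
  have hcp := List.length_eq_countP_add_countP (p := fun y => y == x) (l := s)
  rw [hd, ← List.countP_eq_length_filter]
  have he : List.countP (fun a => decide ¬((fun y => y == x) a = true)) s
      = List.countP (fun y => y != x) s := by
    apply List.countP_congr; intro a _; simp [bne]
  simp only [List.count] at hc
  rw [he] at hcp
  omega

theorem length_ofList_lt {xs : List Int} (h : ¬ xs.Nodup) :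
    (PySem.Set.ofList xs).length < xs.length := by
  induction xs with
  | nil => exact absurd List.nodup_nil h
  | cons x xs ih =>
    rw [PySem.Set.ofList_cons]
    by_cases hx : x ∈ xs
    · have hx' : x ∈ PySem.Set.ofList xs := (PySem.Set.mem_ofList xs x).mpr hx
      have := length_discard_of_mem (PySem.Set.nodup_ofList xs) hx'
      have := PySem.Set.length_ofList_le (xs := xs)
      simp only [List.length_cons]
      omega
    · have hxs : ¬ xs.Nodup := by
        intro hn; exact h (List.nodup_cons.mpr ⟨hx, hn⟩)
      have h1 := ih hxs
      have h2 : (PySem.Set.discard (PySem.Set.ofList xs) x).length ≤ (PySem.Set.ofList xs).length := by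
        simp [PySem.Set.discard]
        exact List.length_filter_le _ _
      simp only [List.length_cons]
      omega

theorem length_ofList_iff (xs : List Int) :
    ((PySem.Set.ofList xs).length = xs.length) ↔ xs.Nodup := by
  constructor
  · intro h
    by_contra hn
    exact absurd h (Nat.ne_of_lt (length_ofList_lt hn))
  · intro h; rw [PySem.Set.ofList_eq_self_of_nodup xs h]

theorem checkDupesLoop_eq (xs : List Int) : ∀ seen : List Int, seen.Nodup → (0:Int) ∉ seen →
    checkDupesLoop xs seen = !decide (seen ++ xs.filter (fun n => n != 0)).Nodup := by
  induction xs with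
  | nil => intro seen hn _; simp [checkDupesLoop, hn]
  | cons x xs ih =>
    intro seen hn h0
    by_cases hmem : x ∈ seen
    · have hx0 : x ≠ 0 := fun h => h0 (h ▸ hmem)
      have : ¬ (seen ++ (x :: xs).filter (fun n => n != 0)).Nodup := by
        intro hd
        have := List.disjoint_of_nodup_append hd
        exact this hmem (by simp [List.mem_filter, hx0])
      simp [checkDupesLoop, hmem, this]
    · by_cases hx0 : x = 0
      · subst hx0
        have hloop : checkDupesLoop (0 :: xs) seen = checkDupesLoop xs seen := by
          simp [checkDupesLoop, hmem]
        rw [hloop, ih seen hn h0]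
        simp only [List.filter_cons, bne_self_eq_false, Bool.false_eq_true, if_false]
      · simp only [checkDupesLoop, List.contains_eq_mem]
        rw [if_neg (by simpa using hmem), if_pos (by simp [bne, hx0])]
        rw [ih (seen ++ [x]) (by simp [List.nodup_append, hn]; intro a ha he; exact hmem (he ▸ ha)) (by simp [h0, Ne.symm hx0])]
        have : (seen ++ [x]) ++ xs.filter (fun n => n != 0) = seen ++ (x :: xs).filter (fun n => n != 0) := by
          simp [bne, hx0]
        rw [this]

theorem check_dupes_spec : Claim_equal_check_dupes := by
  intro l _
  unfold Spec_check_dupes check_dupes check_dupes_alt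
  rw [checkDupesLoop_eq l [] List.nodup_nil (by simp)]
  simp only [List.nil_append]
  set nz := l.filter (fun n => n != 0)
  rcases eq_or_ne (PySem.Set.ofList nz).length nz.length with h | h
  · simp [bne, (length_ofList_iff nz).mp h, h]
  · have hnd : ¬ nz.Nodup := fun hn => h ((length_ofList_iff nz).mpr hn)
    simp [bne, hnd, Ne.symm h]
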